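-- pv_equiv track=rewrite | github.com/thehackersloth/docker-pt | backend/app/utils/security.py | sanitize_command_arg
-- ===== SOURCE A (Python) =====
-- def sanitize_command_arg(arg: str) -> str:
--     """Sanitize argument for shell command (escape special chars)"""
--     # Remove dangerous characters
--     dangerous = ['|', ';', '&', '$', '`', '>', '<', '!', '(', ')', '{', '}', '[', ']']
--     sanitized = arg
--     for char in dangerous:
--         sanitized = sanitized.replace(char, '')
--
--     # Escape quotes
--     sanitized = sanitized.replace("'", "\\'")
--     sanitized = sanitized.replace('"', '\\"')
--
--     return sanitized
-- ===== SOURCE B (Python) =====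
-- def sanitize_command_arg(arg: str) -> str:
--     """Sanitize argument for shell command (escape special chars)"""
--     dangerous = {'|', ';', '&', '$', '`', '>', '<', '!', '(', ')', '{', '}', '[', ']'}
--     pieces = []
--     for ch in arg:
--         if ch in dangerous:
--             continue
--         if ch == "'":
--             pieces.append("\\'")
--         elif ch == '"':
--             pieces.append('\\"')
--         else:
--             pieces.append(ch)
--     return ''.join(pieces)
-- ===== Notes on version B (the rewrite author's own statement) =====
-- stated objective: simpler
-- what changed: Replaces 16 sequential whole-string .replace passes with one single pass over the characters that skips dangerous characters and emits escaped quotes into an output buffer.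
import Mathlib
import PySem

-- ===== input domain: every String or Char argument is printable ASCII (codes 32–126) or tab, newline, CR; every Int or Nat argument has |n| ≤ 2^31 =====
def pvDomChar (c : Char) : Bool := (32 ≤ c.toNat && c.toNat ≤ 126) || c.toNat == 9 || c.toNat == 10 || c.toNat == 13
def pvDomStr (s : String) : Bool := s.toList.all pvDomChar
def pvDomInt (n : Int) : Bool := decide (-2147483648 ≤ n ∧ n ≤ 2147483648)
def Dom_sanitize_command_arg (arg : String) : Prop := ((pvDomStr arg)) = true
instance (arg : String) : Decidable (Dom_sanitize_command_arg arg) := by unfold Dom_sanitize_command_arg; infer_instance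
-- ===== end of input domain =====

-- B replaces A's 16 sequential whole-string replace passes with one single character pass
-- that skips dangerous characters and emits escaped quotes (objective: simpler).

-- ===== PORT A =====
-- dangerous = ['|', ';', '&', '$', '`', '>', '<', '!', '(', ')', '{', '}', '[', ']']
def dangerousA : List String := ["|", ";", "&", "$", "`", ">", "<", "!", "(", ")", "{", "}", "[", "]"]

def sanitize_command_arg (arg : String) : String :=
  let sanitized := dangerousA.foldl (fun s ch => PySem.Str.replace s ch "") arg
  let sanitized := PySem.Str.replace sanitized "'" "\\'"
  let sanitized := PySem.Str.replace sanitized "\"" "\\\""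
  sanitized

-- ===== PORT B =====
def dangerousB : PySem.Set Char :=
  PySem.Set.ofList ['|', ';', '&', '$', '`', '>', '<', '!', '(', ')', '{', '}', '[', ']']

-- the per-character piece B appends to its output buffer (empty for a skipped char)
def sanitizePiece (c : Char) : List Char :=
  if dangerousB.contains c then []
  else if c = '\'' then ['\\', '\'']
  else if c = '"' then ['\\', '"']
  else [c]

def sanitize_command_arg_alt (arg : String) : String :=
  String.ofList (arg.toList.flatMap sanitizePiece)

-- ===== PRECONDITION & SPEC =====
def Spec_sanitize_command_arg (arg : String) (out : String) : Prop := out = sanitize_command_arg_alt arg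
instance (arg : String) (out : String) : Decidable (Spec_sanitize_command_arg arg out) := by unfold Spec_sanitize_command_arg; infer_instance

-- ===== CLAIM (what is proved, stated in full; the proofs are below) =====
def Claim_equal_sanitize_command_arg : Prop := ∀ (arg : String), Dom_sanitize_command_arg arg → Spec_sanitize_command_arg arg (sanitize_command_arg arg)

-- ===== LEMMAS AND PROOFS =====

-- replace with a single-character pattern is a flatMap over the characters
theorem replace_go_single (c : Char) (new : List Char) :
    ∀ (l : List Char) (acc : List Char) (fuel : Nat), l.length ≤ fuel →
      PySem.Chars.replace.go [c] new fuel l acc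
        = acc.reverse ++ l.flatMap (fun x => if x = c then new else [x]) := by
  intro l
  induction l with
  | nil =>
    intro acc fuel _
    cases fuel <;> simp [PySem.Chars.replace.go]
  | cons h t ih =>
    intro acc fuel hf
    cases fuel with
    | zero => simp at hf
    | succ f =>
      by_cases hc : c = h
      · subst hc
        simp [PySem.Chars.replace.go, List.isPrefixOf,
          ih (new.reverse ++ acc) f (by simpa using hf)]
      · simp [PySem.Chars.replace.go, List.isPrefixOf, hc, Ne.symm hc,
          ih (h :: acc) f (by simpa using hf)]

theorem replace_single (c : Char) (new s : List Char) :
    PySem.Chars.replace s [c] new = s.flatMap (fun x => if x = c then new else [x]) := by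
  simpa using replace_go_single c new s [] s.length le_rfl

theorem sanitize_command_arg_spec : Claim_equal_sanitize_command_arg := by
  intro arg _
  unfold Spec_sanitize_command_arg sanitize_command_arg sanitize_command_arg_alt
  apply String.ext
  simp only [dangerousA, List.foldl_cons, List.foldl_nil, PySem.Str.toList_replace,
    String.toList_ofList]
  simp only [show ("|" : String).toList = ['|'] from rfl,
    show (";" : String).toList = [';'] from rfl,
    show ("&" : String).toList = ['&'] from rfl,
    show ("$" : String).toList = ['$'] from rfl,
    show ("`" : String).toList = ['`'] from rfl,
    show (">" : String).toList = ['>'] from rfl,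
    show ("<" : String).toList = ['<'] from rfl,
    show ("!" : String).toList = ['!'] from rfl,
    show ("(" : String).toList = ['('] from rfl,
    show (")" : String).toList = [')'] from rfl,
    show ("{" : String).toList = ['{'] from rfl,
    show ("}" : String).toList = ['}'] from rfl,
    show ("[" : String).toList = ['['] from rfl,
    show ("]" : String).toList = [']'] from rfl,
    show ("'" : String).toList = ['\''] from rfl,
    show ("\\'" : String).toList = ['\\', '\''] from rfl,
    show ("\"" : String).toList = ['"'] from rfl,
    show ("\\\"" : String).toList = ['\\', '"'] from rfl,
    show ("" : String).toList = [] from rfl,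
    replace_single, List.flatMap_assoc]
  apply List.flatMap_congr
  intro c _
  rcases eq_or_ne c '|' with h0|h0
  · simp [h0, sanitizePiece, dangerousB, PySem.Set.contains, PySem.Set.ofList]
  rcases eq_or_ne c ';' with h1|h1
  · simp [h1, sanitizePiece, dangerousB, PySem.Set.contains, PySem.Set.ofList]
  rcases eq_or_ne c '&' with h2|h2
  · simp [h2, sanitizePiece, dangerousB, PySem.Set.contains, PySem.Set.ofList]
  rcases eq_or_ne c '$' with h3|h3
  · simp [h3, sanitizePiece, dangerousB, PySem.Set.contains, PySem.Set.ofList]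
  rcases eq_or_ne c '`' with h4|h4
  · simp [h4, sanitizePiece, dangerousB, PySem.Set.contains, PySem.Set.ofList]
  rcases eq_or_ne c '>' with h5|h5
  · simp [h5, sanitizePiece, dangerousB, PySem.Set.contains, PySem.Set.ofList]
  rcases eq_or_ne c '<' with h6|h6
  · simp [h6, sanitizePiece, dangerousB, PySem.Set.contains, PySem.Set.ofList]
  rcases eq_or_ne c '!' with h7|h7
  · simp [h7, sanitizePiece, dangerousB, PySem.Set.contains, PySem.Set.ofList]
  rcases eq_or_ne c '(' with h8|h8
  · simp [h8, sanitizePiece, dangerousB, PySem.Set.contains, PySem.Set.ofList]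
  rcases eq_or_ne c ')' with h9|h9
  · simp [h9, sanitizePiece, dangerousB, PySem.Set.contains, PySem.Set.ofList]
  rcases eq_or_ne c '{' with h10|h10
  · simp [h10, sanitizePiece, dangerousB, PySem.Set.contains, PySem.Set.ofList]
  rcases eq_or_ne c '}' with h11|h11
  · simp [h11, sanitizePiece, dangerousB, PySem.Set.contains, PySem.Set.ofList]
  rcases eq_or_ne c '[' with h12|h12
  · simp [h12, sanitizePiece, dangerousB, PySem.Set.contains, PySem.Set.ofList]
  rcases eq_or_ne c ']' with h13|h13
  · simp [h13, sanitizePiece, dangerousB, PySem.Set.contains, PySem.Set.ofList]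
  rcases eq_or_ne c '\'' with h14|h14
  · simp [h14, sanitizePiece, dangerousB, PySem.Set.contains, PySem.Set.ofList]
  rcases eq_or_ne c '"' with h15|h15
  · simp [h15, sanitizePiece, dangerousB, PySem.Set.contains, PySem.Set.ofList]
  simp [sanitizePiece, dangerousB, PySem.Set.contains, PySem.Set.ofList, h0, h1, h2, h3, h4, h5, h6, h7, h8, h9, h10, h11, h12, h13, h14, h15]
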